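-- pv_equiv track=rewrite | github.com/modflowpy/flopy | flopy/mf6/mfbase.py | _in_pkg_list
-- ===== SOURCE A (Python) =====
-- def _in_pkg_list(pkg_list, pkg_type, pkg_name):
--     if pkg_type is not None:
--         pkg_type = pkg_type.lower()
--     if pkg_name is not None:
--         pkg_name = pkg_name.lower()
--     if pkg_type in pkg_list or pkg_name in pkg_list:
--         return True
--
--     # split to make cases like "gwf6-gwf6" easier to process
--     pkg_type = pkg_type.split("-")
--     try:
--         # if there is a number on the end of the package try
--         # excluding it
--         int(pkg_type[0][-1])
--         for key in pkg_list.keys():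
--             key = key.split("-")
--             if len(key) == len(pkg_type):
--                 matches = True
--                 for key_item, pkg_item in zip(key, pkg_type):
--                     if pkg_item[0:-1] != key_item and pkg_item != key_item:
--                         matches = False
--                 if matches:
--                     return True
--     except ValueError:
--         return False
--     return False
-- ===== SOURCE B (Python) =====
-- def _in_pkg_list(pkg_list, pkg_type, pkg_name):
--     if pkg_type is not None:
--         pkg_type = pkg_type.lower()
--     if pkg_name is not None:
--         pkg_name = pkg_name.lower()
--     if pkg_type in pkg_list or pkg_name in pkg_list:
--         return True
--
--     comps = pkg_type.split("-")
--     try: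
--         # same guard as the original: only a trailing digit makes
--         # the trimmed forms worth trying
--         int(comps[0][-1])
--     except ValueError:
--         return False
--     # instead of scanning and splitting every key, generate every
--     # candidate (each component kept or with its last char dropped)
--     # and look the joined names up in the dict
--     candidates = [[comps[0]], [comps[0][:-1]]]
--     for comp in comps[1:]:
--         candidates = [pre + [choice]
--                       for pre in candidates
--                       for choice in (comp, comp[:-1])]
--     return any("-".join(cand) in pkg_list for cand in candidates)
-- ===== Notes on version B (the rewrite author's own statement) =====
-- stated objective: alternative
-- what changed: Instead of scanning every key of pkg_list and splitting and comparing it component-wise, B generates the candidate names (each '-'-component of pkg_type kept or with its trailing character dropped, joined back with '-') and does dict-membership lookups, so the per-key split-and-compare loop disappears.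
import Mathlib
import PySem

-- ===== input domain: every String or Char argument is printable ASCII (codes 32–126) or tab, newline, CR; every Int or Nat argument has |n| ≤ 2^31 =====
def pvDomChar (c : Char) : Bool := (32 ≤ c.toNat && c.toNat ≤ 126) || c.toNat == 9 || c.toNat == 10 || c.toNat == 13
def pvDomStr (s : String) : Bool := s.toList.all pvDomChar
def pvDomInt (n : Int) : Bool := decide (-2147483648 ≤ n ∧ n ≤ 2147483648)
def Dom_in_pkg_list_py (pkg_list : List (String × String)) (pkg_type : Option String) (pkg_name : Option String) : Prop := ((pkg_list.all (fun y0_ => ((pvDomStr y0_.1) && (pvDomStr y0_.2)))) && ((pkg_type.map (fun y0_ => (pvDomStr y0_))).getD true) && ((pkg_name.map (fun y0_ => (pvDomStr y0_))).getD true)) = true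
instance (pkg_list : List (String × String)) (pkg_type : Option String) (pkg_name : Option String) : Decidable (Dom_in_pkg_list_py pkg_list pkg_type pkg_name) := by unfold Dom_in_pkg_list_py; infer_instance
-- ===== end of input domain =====

-- B replaces A's scan over all pkg_list keys (splitting and comparing each) by
-- generating the candidate package names and looking them up; same return value.
-- On inputs where the Python raises (excluded by Pre_) both ports return false.


-- ===== PORT A =====
-- 'x in pkg_list' where x may be None: None never equals a str key
def pvOptInKeys (keys : List String) : Option String → Bool
  | some s => keys.contains s
  | none => false

-- the shared guard line 'int(pkg_type[0][-1])' of both Pythons: true iff the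
-- int() call succeeds; false covers the caught ValueError, and also the raising
-- IndexError inputs (excluded by Pre_), on which both ports then return false
def pvGuardOk (comps : List (List Char)) : Bool :=
  match PySem.List.pyGet? comps 0 with
  | none => false
  | some c0 =>
    match PySem.List.pyGet? c0 (-1) with
    | none => false
    | some ch => (PySem.Int.ofChars? [ch]).isSome

-- A's for-loop over pkg_list.keys() with its early 'return True'
def pvScanKeys (comps : List (List Char)) : List String → Bool
  | [] => false
  | k :: ks =>
    let kc := PySem.Chars.splitOn k.toList ['-']
    if kc.length = comps.length then
      -- 'matches' stays True iff no zipped (key_item, pkg_item) pair fails A's test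
      let matchesB := (kc.zip comps).all fun kp =>
        !(PySem.Chars.slice kp.2 (some 0) (some (-1)) != kp.1 && kp.2 != kp.1)
      if matchesB then true else pvScanKeys comps ks
    else pvScanKeys comps ks

-- the part of A after pkg_type.split('-')
def pvTailA (keys : List String) (s : String) : Bool :=
  let comps := PySem.Chars.splitOn s.toList ['-']
  if pvGuardOk comps then pvScanKeys comps keys else false

def in_pkg_list_py (pkg_list : List (String × String)) (pkg_type : Option String) (pkg_name : Option String) : Bool :=
  let keys := pkg_list.map Prod.fst
  let pt := pkg_type.map PySem.Str.lower
  let pn := pkg_name.map PySem.Str.lower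
  if pvOptInKeys keys pt || pvOptInKeys keys pn then true
  else
    match pt with
    | none => false       -- Python raises AttributeError at .split here: outside Pre_
    | some s => pvTailA keys s

-- ===== PORT B =====
-- one round of B's candidate comprehension: every prefix extended by the
-- component kept and by the component with its last char sliced off
def pvExtend (pres : List (List (List Char))) (comp : List Char) : List (List (List Char)) :=
  pres.flatMap fun pre => [pre ++ [comp], pre ++ [PySem.Chars.slice comp (some 0) (some (-1))]]

-- the part of B after pkg_type.split('-'): build the candidates, join, look up
def pvTailB (keys : List String) (s : String) : Bool :=
  let comps := PySem.Chars.splitOn s.toList ['-']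
  if pvGuardOk comps then
    let c0 := PySem.List.pyGetD comps 0 []   -- comps[0]; in range: split is never empty
    let cands := (comps.drop 1).foldl pvExtend
      [[c0], [PySem.Chars.slice c0 (some 0) (some (-1))]]
    cands.any fun cand => keys.any fun k => k.toList == PySem.Chars.join ['-'] cand
  else false

def in_pkg_list_py_alt (pkg_list : List (String × String)) (pkg_type : Option String) (pkg_name : Option String) : Bool :=
  let keys := pkg_list.map Prod.fst
  let pt := pkg_type.map PySem.Str.lower
  let pn := pkg_name.map PySem.Str.lower
  if pvOptInKeys keys pt || pvOptInKeys keys pn then true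
  else
    match pt with
    | none => false       -- Python raises AttributeError at .split here: outside Pre_
    | some s => pvTailB keys s

-- ===== PRECONDITION & SPEC =====
-- Pre_ excludes exactly the inputs where the Python raises: pkg_type = None
-- (AttributeError at .split) or a lowered pkg_type whose first '-'-component is
-- empty (IndexError at [0][-1]) — unless the early membership test already
-- returned True. A returns on every input Pre_ admits.
def Pre_in_pkg_list_py (pkg_list : List (String × String)) (pkg_type : Option String) (pkg_name : Option String) : Prop :=
  ((match pkg_type with
    | some s => (pkg_list.map Prod.fst).contains (PySem.Str.lower s)
    | none => false) ||
   (match pkg_name with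
    | some s => (pkg_list.map Prod.fst).contains (PySem.Str.lower s)
    | none => false) ||
   (match pkg_type with
    | some s => !(((PySem.Str.lower s).toList.splitOn '-').headD []).isEmpty
    | none => false)) = true
instance (pkg_list : List (String × String)) (pkg_type : Option String) (pkg_name : Option String) : Decidable (Pre_in_pkg_list_py pkg_list pkg_type pkg_name) := by unfold Pre_in_pkg_list_py; infer_instance

def pvWitness_in_pkg_list_py : (List (String × String)) × Option String × Option String :=
  ([("utl-obs6", "x")], some "UTL-OBS6", some "mypkg")

def Spec_in_pkg_list_py (pkg_list : List (String × String)) (pkg_type : Option String) (pkg_name : Option String) (out : Bool) : Prop := out = in_pkg_list_py_alt pkg_list pkg_type pkg_name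
instance (pkg_list : List (String × String)) (pkg_type : Option String) (pkg_name : Option String) (out : Bool) : Decidable (Spec_in_pkg_list_py pkg_list pkg_type pkg_name out) := by unfold Spec_in_pkg_list_py; infer_instance

-- ===== CLAIM (what is proved, stated in full; the proofs are below) =====
def Claim_equal_in_pkg_list_py : Prop := ∀ (pkg_list : List (String × String)) (pkg_type : Option String) (pkg_name : Option String), Dom_in_pkg_list_py pkg_list pkg_type pkg_name → Pre_in_pkg_list_py pkg_list pkg_type pkg_name → Spec_in_pkg_list_py pkg_list pkg_type pkg_name (in_pkg_list_py pkg_list pkg_type pkg_name)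

-- ===== LEMMAS AND PROOFS =====

-- slicing [0:-1] is dropLast (both the raw and the simp-normalised slice call)
theorem pvSlice01' (l : List Char) : PySem.List.slice l (some 0) (some (-1)) = l.dropLast := by
  simp [PySem.List.slice, PySem.List.clampIdx, List.dropLast_eq_take]
  split_ifs with h
  · subst h; simp
  · omega

theorem pvSlice01 (l : List Char) : PySem.Chars.slice l (some 0) (some (-1)) = l.dropLast := by
  rw [PySem.Chars.slice_eq_listSlice]; exact pvSlice01' l

-- the same fact in simp-normal form (simp rewrites a 0 start bound to none)
theorem pvSlice01n (l : List Char) : PySem.List.slice l none (some (-1)) = l.dropLast := by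
  simp [PySem.List.slice, PySem.List.clampIdx, List.dropLast_eq_take]
  split_ifs with h
  · subst h; simp
  · omega

theorem pvSplitOnP_ne_nil (p : Char → Bool) (s : List Char) : List.splitOnP p s ≠ [] := by
  induction s with
  | nil => simp [List.splitOnP_nil]
  | cons c cs ih =>
    rw [List.splitOnP_cons]
    split
    · simp
    · cases h : List.splitOnP p cs with
      | nil => exact absurd h ih
      | cons a as => simp

theorem pvSplitOn_ne_nil (s : List Char) : s.splitOn '-' ≠ [] := pvSplitOnP_ne_nil _ s

-- PySem's fueled split agrees with Mathlib's List.splitOn for the one-char separator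
theorem pvSplitOn_go (fuel : Nat) : ∀ (l cur : List Char) (acc : List (List Char)),
    l.length < fuel →
    PySem.Chars.splitOn.go ['-'] fuel l cur acc
      = acc.reverse ++ (l.splitOn '-').modifyHead (fun x => cur.reverse ++ x) := by
  induction fuel with
  | zero => intro l cur acc h; omega
  | succ f ih =>
    intro l cur acc h
    cases l with
    | nil =>
      rw [PySem.Chars.splitOn.go]
      all_goals first
        | omega
        | simp [List.splitOn, List.splitOnP_nil]
    | cons c cs =>
      have hf : cs.length < f := by simpa [Nat.succ_lt_succ_iff] using h
      obtain ⟨a, as, hs⟩ : ∃ a as, cs.splitOn '-' = a :: as := by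
        cases hsp : cs.splitOn '-' with
        | nil => exact absurd hsp (pvSplitOn_ne_nil cs)
        | cons a as => exact ⟨a, as, rfl⟩
      rw [PySem.Chars.splitOn.go]
      by_cases hc : c = '-'
      · subst hc
        rw [if_pos (by simp [List.isPrefixOf])]
        rw [show List.drop ['-'].length ('-' :: cs) = cs from rfl]
        rw [ih cs [] (List.reverse cur :: acc) hf]
        have h2 : ('-' :: cs).splitOn '-' = [] :: cs.splitOn '-' := by
          simp only [List.splitOn, List.splitOnP_cons]
          rw [if_pos (by simp)]
        rw [h2, hs]
        simp
      · have hpre : List.isPrefixOf ['-'] (c :: cs) = false := by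
          simp [List.isPrefixOf]
          exact fun hcc => absurd hcc.symm hc
        rw [if_neg (by simp [hpre])]
        rw [ih cs (c :: cur) acc hf]
        have h2 : (c :: cs).splitOn '-' = List.modifyHead (List.cons c) (cs.splitOn '-') := by
          simp only [List.splitOn, List.splitOnP_cons]
          rw [if_neg (by simp [hc])]
        rw [h2, hs]
        simp

theorem pvSplitOn_single (s : List Char) : PySem.Chars.splitOn s ['-'] = s.splitOn '-' := by
  rw [PySem.Chars.splitOn]
  rw [pvSplitOn_go (s.length + 1) s [] [] (by omega)]
  obtain ⟨a, as, hs⟩ : ∃ a as, s.splitOn '-' = a :: as := by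
    cases hsp : s.splitOn '-' with
    | nil => exact absurd hsp (pvSplitOn_ne_nil s)
    | cons a as => exact ⟨a, as, rfl⟩
  simp [hs]

theorem pvSplitOnP_not_mem (p : Char → Bool) (s : List Char) :
    ∀ q ∈ List.splitOnP p s, ∀ c ∈ q, ¬ p c = true := by
  induction s with
  | nil => simp [List.splitOnP_nil]
  | cons x xs ih =>
    rw [List.splitOnP_cons]
    by_cases hx : p x = true
    · rw [if_pos hx]
      rintro q hq c hc
      rcases List.mem_cons.1 hq with rfl | hq
      · simp at hc
      · exact ih q hq c hc
    · rw [if_neg hx]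
      cases hsp : List.splitOnP p xs with
      | nil => exact absurd hsp (pvSplitOnP_ne_nil p xs)
      | cons a as =>
        rintro q hq c hc
        rcases List.mem_cons.1 hq with rfl | hq
        · rcases List.mem_cons.1 hc with rfl | hc
          · exact hx
          · exact ih a (hsp ▸ List.mem_cons_self) c hc
        · exact ih q (hsp ▸ List.mem_cons_of_mem a hq) c hc

theorem pvSplitOn_not_mem (s : List Char) : ∀ q ∈ s.splitOn '-', '-' ∉ q := by
  intro q hq hmem
  exact pvSplitOnP_not_mem (· == '-') s q hq '-' hmem (by simp)

-- the relation a candidate component bears to a pkg_type component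
def pvR (c x : List Char) : Prop := x = c ∨ x = c.dropLast

-- membership in B's candidate fold
theorem pvExtend_mem (rest : List (List Char)) : ∀ (init : List (List (List Char))) (cand : List (List Char)),
    cand ∈ rest.foldl pvExtend init ↔
      ∃ pre ∈ init, ∃ ext, List.Forall₂ pvR rest ext ∧ cand = pre ++ ext := by
  induction rest with
  | nil =>
    intro init cand
    simp [List.forall₂_nil_left_iff]
  | cons c cs ih =>
    intro init cand
    rw [List.foldl_cons, ih]
    constructor
    · rintro ⟨pre', hpre', ext, hf, rfl⟩
      simp only [pvExtend, List.mem_flatMap, List.mem_cons, List.not_mem_nil, or_false,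
        pvSlice01] at hpre'
      obtain ⟨pre, hpre, hx | hx⟩ := hpre' <;> subst hx
      · exact ⟨pre, hpre, c :: ext, List.Forall₂.cons (Or.inl rfl) hf, by simp⟩
      · exact ⟨pre, hpre, c.dropLast :: ext, List.Forall₂.cons (Or.inr rfl) hf, by simp⟩
    · rintro ⟨pre, hpre, ext, hf, rfl⟩
      obtain ⟨x, ext', rfl, hx, hf2⟩ : ∃ x ext', ext = x :: ext' ∧ pvR c x ∧ List.Forall₂ pvR cs ext' := by
        cases hf with
        | cons h1 h2 => exact ⟨_, _, rfl, h1, h2⟩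
      refine ⟨pre ++ [x], ?_, ext', hf2, by simp⟩
      simp only [pvExtend, List.mem_flatMap, List.mem_cons, List.not_mem_nil, or_false,
        pvSlice01]
      rcases hx with rfl | rfl
      · exact ⟨pre, hpre, Or.inl rfl⟩
      · exact ⟨pre, hpre, Or.inr rfl⟩

-- A's scan, as an existential over keys
theorem pvScan_iff (comps : List (List Char)) (keys : List String) :
    pvScanKeys comps keys = true ↔
      ∃ k ∈ keys, List.Forall₂ (fun ki pi => pi.dropLast = ki ∨ pi = ki)
        (PySem.Chars.splitOn k.toList ['-']) comps := by
  induction keys with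
  | nil => simp [pvScanKeys]
  | cons k ks ih =>
    simp only [pvScanKeys]
    split_ifs with h1 h2
    · simp only [true_iff]
      refine ⟨k, List.mem_cons_self, ?_⟩
      rw [List.forall₂_iff_zip]
      refine ⟨h1, ?_⟩
      intro a b hab
      have := (List.all_eq_true.1 h2) (a, b) hab
      simpa [pvSlice01, pvSlice01n, Bool.not_and, or_comm] using this
    · rw [ih]
      constructor
      · rintro ⟨k', hk', hf⟩
        exact ⟨k', List.mem_cons_of_mem k hk', hf⟩
      · rintro ⟨k', hk', hf⟩
        rcases List.mem_cons.1 hk' with rfl | hk'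
        · exfalso
          apply h2
          rw [List.all_eq_true]
          rintro ⟨a, b⟩ hab
          have := (List.forall₂_iff_zip.1 hf).2 hab
          simpa [pvSlice01, pvSlice01n, Bool.not_and, or_comm] using this
        · exact ⟨k', hk', hf⟩
    · rw [ih]
      constructor
      · rintro ⟨k', hk', hf⟩
        exact ⟨k', List.mem_cons_of_mem k hk', hf⟩
      · rintro ⟨k', hk', hf⟩
        rcases List.mem_cons.1 hk' with rfl | hk'
        · exact absurd (List.forall₂_iff_zip.1 hf).1 h1
        · exact ⟨k', hk', hf⟩

-- per-key equivalence: A's component test holds iff the key is a joined candidate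
theorem pvKey_iff (comps : List (List Char)) (k : List Char)
    (hne : comps ≠ []) (hfree : ∀ p ∈ comps, '-' ∉ p) :
    List.Forall₂ (fun ki pi => pi.dropLast = ki ∨ pi = ki) (k.splitOn '-') comps ↔
      ∃ ext, List.Forall₂ pvR comps ext ∧ ['-'].intercalate ext = k := by
  constructor
  · intro hf
    refine ⟨k.splitOn '-', ?_, List.intercalate_splitOn k '-'⟩
    have hf' : List.Forall₂ (flip pvR) (k.splitOn '-') comps :=
      hf.imp (fun {a b} h => by rcases h with h | h; exacts [Or.inr h.symm, Or.inl h.symm])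
    exact hf'.flip
  · rintro ⟨ext, hf, rfl⟩
    have hmem : ∀ p ∈ ext, ∃ c ∈ comps, pvR c p := by
      clear hne hfree
      induction hf with
      | nil => simp
      | cons hx hrest ih =>
        intro p hp
        rcases List.mem_cons.1 hp with rfl | hp
        · exact ⟨_, List.mem_cons_self, hx⟩
        · obtain ⟨c, hc, hr⟩ := ih p hp
          exact ⟨c, List.mem_cons_of_mem _ hc, hr⟩
    have hextfree : ∀ p ∈ ext, '-' ∉ p := by
      intro p hp hdp
      obtain ⟨c, hc, hr⟩ := hmem p hp
      rcases hr with h | h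
      · exact hfree c hc (h ▸ hdp)
      · exact hfree c hc (List.dropLast_subset c (h ▸ hdp))
    have hextne : ext ≠ [] := by
      intro hnil; subst hnil
      exact hne (List.forall₂_nil_right_iff.1 hf)
    rw [List.splitOn_intercalate ext '-' hextfree hextne]
    have hf' : List.Forall₂ (flip fun ki pi => pi.dropLast = ki ∨ pi = ki) comps ext :=
      hf.imp (fun {a b} h => by rcases h with h | h; exacts [Or.inr h.symm, Or.inl h.symm])
    exact hf'.flip

-- B's candidates are exactly the component selections
theorem pvCands_iff (c0 : List Char) (rest : List (List Char)) (cand : List (List Char)) :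
    cand ∈ rest.foldl pvExtend [[c0], [PySem.Chars.slice c0 (some 0) (some (-1))]] ↔
      List.Forall₂ pvR (c0 :: rest) cand := by
  rw [pvExtend_mem]
  constructor
  · rintro ⟨pre, hpre, ext, hf, rfl⟩
    rcases List.mem_cons.1 hpre with rfl | hpre
    · exact List.Forall₂.cons (Or.inl rfl) hf
    · rw [List.mem_singleton] at hpre
      subst hpre
      exact List.Forall₂.cons (Or.inr (pvSlice01 c0)) hf
  · intro hf
    obtain ⟨x, ext, rfl, hx, hf2⟩ : ∃ x ext, cand = x :: ext ∧ pvR c0 x ∧ List.Forall₂ pvR rest ext := by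
      cases hf with
      | cons h1 h2 => exact ⟨_, _, rfl, h1, h2⟩
    rcases hx with rfl | rfl
    · exact ⟨[x], by simp, ext, hf2, by simp⟩
    · exact ⟨[c0.dropLast], by simp [pvSlice01n], ext, hf2, by simp⟩

-- the core: A's key scan equals B's candidate lookup
theorem pvMain (s' : List Char) (keys : List String) :
    pvScanKeys (PySem.Chars.splitOn s' ['-']) keys
      = (((PySem.Chars.splitOn s' ['-']).drop 1).foldl pvExtend
          [[PySem.List.pyGetD (PySem.Chars.splitOn s' ['-']) 0 []],
           [PySem.Chars.slice (PySem.List.pyGetD (PySem.Chars.splitOn s' ['-']) 0 []) (some 0) (some (-1))]]).any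
          (fun cand => keys.any fun k => k.toList == PySem.Chars.join ['-'] cand) := by
  have hfree0 := pvSplitOn_not_mem s'
  rw [pvSplitOn_single]
  obtain ⟨a, rest, hL⟩ : ∃ a rest, s'.splitOn '-' = a :: rest := by
    cases hsp : s'.splitOn '-' with
    | nil => exact absurd hsp (pvSplitOn_ne_nil s')
    | cons a rest => exact ⟨a, rest, rfl⟩
  rw [hL] at hfree0 ⊢
  simp only [PySem.List.pyGetD_zero_cons, List.drop_succ_cons, List.drop_zero]
  rw [Bool.eq_iff_iff]
  rw [pvScan_iff]
  constructor
  · rintro ⟨k, hk, hf⟩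
    rw [pvSplitOn_single] at hf
    obtain ⟨ext, hfe, hjoin⟩ := (pvKey_iff (a :: rest) k.toList (by simp) hfree0).1 hf
    rw [List.any_eq_true]
    refine ⟨ext, (pvCands_iff a rest ext).2 hfe, ?_⟩
    rw [List.any_eq_true]
    refine ⟨k, hk, ?_⟩
    rw [beq_iff_eq]
    rw [show PySem.Chars.join ['-'] ext = ['-'].intercalate ext from rfl]
    exact hjoin.symm
  · intro hr
    rw [List.any_eq_true] at hr
    obtain ⟨cand, hcand, hin⟩ := hr
    rw [List.any_eq_true] at hin
    obtain ⟨k, hk, hbe⟩ := hin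
    rw [beq_iff_eq] at hbe
    refine ⟨k, hk, ?_⟩
    rw [pvSplitOn_single]
    refine (pvKey_iff (a :: rest) k.toList (by simp) hfree0).2 ⟨cand, (pvCands_iff a rest cand).1 hcand, ?_⟩
    rw [show PySem.Chars.join ['-'] cand = ['-'].intercalate cand from rfl] at hbe
    exact hbe.symm

-- the two tails agree on every pkg_type string
theorem pvTail_eq (keys : List String) (s : String) : pvTailA keys s = pvTailB keys s := by
  simp only [pvTailA, pvTailB]
  by_cases hg : pvGuardOk (PySem.Chars.splitOn s.toList ['-']) = true
  · simp only [hg, if_true]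
    exact pvMain s.toList keys
  · simp only [Bool.not_eq_true] at hg
    simp only [hg, Bool.false_eq_true, if_false]

-- the ports agree on every input
theorem pvGlue (pkg_list : List (String × String)) (pkg_type pkg_name : Option String) :
    in_pkg_list_py pkg_list pkg_type pkg_name = in_pkg_list_py_alt pkg_list pkg_type pkg_name := by
  simp only [in_pkg_list_py, in_pkg_list_py_alt]
  by_cases hE : (pvOptInKeys (pkg_list.map Prod.fst) (pkg_type.map PySem.Str.lower)
      || pvOptInKeys (pkg_list.map Prod.fst) (pkg_name.map PySem.Str.lower)) = true
  · simp only [hE, if_true]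
  · simp only [Bool.not_eq_true] at hE
    simp only [hE, Bool.false_eq_true, if_false]
    cases pkg_type.map PySem.Str.lower with
    | none => rfl
    | some s => exact pvTail_eq (pkg_list.map Prod.fst) s

-- ===== VERDICT (by name: the statement is the Claim_ definition above) =====
theorem in_pkg_list_py_spec : Claim_equal_in_pkg_list_py := by
  intro pkg_list pkg_type pkg_name _ _
  exact pvGlue pkg_list pkg_type pkg_name
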